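-- pv_equiv track=rewrite | github.com/SMTG-Bham/sumo | sumo/electronic_structure/dos.py | sort_orbitals
-- ===== SOURCE A (Python) =====
-- def sort_orbitals(element_pdos):
--     """Sort the orbitals of an element's projected density of states.
--
--     Sorts the orbitals based on a standard format. E.g. s < p < d.
--     Will also sort lm decomposed orbitals. This is useful for plotting/saving.
--
--     Args:
--         element_pdos (dict): An element's pdos. Should be formatted as a
--             :obj:`dict` of ``{orbital: dos}``. Where dos is a
--             :obj:`~pymatgen.electronic_structure.dos.Dos` object. For example::
--
--                 {'s': dos, 'px': dos}
--
--     Returns: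
--         list: The sorted orbitals.
--     """
--     sorted_orbitals = ['s', 'p', 'py', 'pz', 'px',
--                        'd', 'dxy', 'dyz', 'dz2', 'dxz', 'dx2',
--                        'f', 'f_3', 'f_2', 'f_1', 'f0', 'f1', 'f2', 'f3']
--     unsorted_keys = element_pdos.keys()
--
--     sorted_keys = []
--     for key in sorted_orbitals:
--         if key in unsorted_keys:
--             sorted_keys.append(key)
--
--     return sorted_keys
-- ===== SOURCE B (Python) =====
-- def sort_orbitals(element_pdos):
--     """Sort the orbitals of an element's projected density of states.
--
--     Re-implementation: build a rank table once (orbital -> canonical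
--     position) and sort the present keys by their rank, dropping unknown
--     keys, instead of scanning the canonical list and testing membership.
--     """
--     canonical = ['s', 'p', 'py', 'pz', 'px',
--                  'd', 'dxy', 'dyz', 'dz2', 'dxz', 'dx2',
--                  'f', 'f_3', 'f_2', 'f_1', 'f0', 'f1', 'f2', 'f3']
--     rank = {name: i for i, name in enumerate(canonical)}
--     return sorted((k for k in element_pdos.keys() if k in rank),
--                   key=rank.__getitem__)
-- ===== Notes on version B (the rewrite author's own statement) =====
-- stated objective: idiomatic
-- what changed: Instead of scanning the fixed canonical orbital list and testing membership of each name in the dict's keys, B builds a rank dictionary once (orbital name -> canonical position), filters the dict's keys to known orbitals, and sorts them by rank.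
import Mathlib
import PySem

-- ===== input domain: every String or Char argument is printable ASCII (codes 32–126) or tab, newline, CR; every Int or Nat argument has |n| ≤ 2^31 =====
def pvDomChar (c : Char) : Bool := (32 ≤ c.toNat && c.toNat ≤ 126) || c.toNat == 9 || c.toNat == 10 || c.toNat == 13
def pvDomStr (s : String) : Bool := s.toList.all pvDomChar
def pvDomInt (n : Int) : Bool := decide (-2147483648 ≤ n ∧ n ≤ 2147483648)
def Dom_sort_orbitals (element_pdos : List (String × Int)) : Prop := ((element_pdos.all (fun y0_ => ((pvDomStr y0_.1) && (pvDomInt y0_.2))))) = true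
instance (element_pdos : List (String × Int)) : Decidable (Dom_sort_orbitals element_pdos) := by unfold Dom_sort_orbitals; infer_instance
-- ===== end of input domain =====

-- B replaces A's scan-the-canonical-list-and-test-membership loop by a rank
-- table over the canonical names and a sort of the present keys by rank (idiomatic).

-- ===== PORT A =====
def sort_orbitals (element_pdos : List (String × Int)) : List String :=
  let sorted_orbitals : List String :=
    ["s", "p", "py", "pz", "px",
     "d", "dxy", "dyz", "dz2", "dxz", "dx2",
     "f", "f_3", "f_2", "f_1", "f0", "f1", "f2", "f3"]
  let unsorted_keys := (PySem.Dict.ofList element_pdos).keys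
  sorted_orbitals.foldl
    (fun sorted_keys key =>
      if unsorted_keys.contains key then sorted_keys ++ [key] else sorted_keys) []

-- ===== PORT B =====
-- rank = {name: i for i, name in enumerate(canonical)}
def pvRank : PySem.Dict String Int :=
  PySem.Dict.ofList
    ((PySem.List.enumerate
        ["s", "p", "py", "pz", "px",
         "d", "dxy", "dyz", "dz2", "dxz", "dx2",
         "f", "f_3", "f_2", "f_1", "f0", "f1", "f2", "f3"]).map
      (fun p => (p.2, p.1)))

def sort_orbitals_alt (element_pdos : List (String × Int)) : List String :=
  PySem.List.sorted
    (((PySem.Dict.ofList element_pdos).keys).filter (fun k => pvRank.contains k))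
    (fun k => pvRank.getD k 0) false

-- ===== PRECONDITION & SPEC =====
def Spec_sort_orbitals (element_pdos : List (String × Int)) (out : List String) : Prop := out = sort_orbitals_alt element_pdos
instance (element_pdos : List (String × Int)) (out : List String) : Decidable (Spec_sort_orbitals element_pdos out) := by unfold Spec_sort_orbitals; infer_instance

-- ===== CLAIM (what is proved, stated in full; the proofs are below) =====
def Claim_equal_sort_orbitals : Prop := ∀ (element_pdos : List (String × Int)), Dom_sort_orbitals element_pdos → Spec_sort_orbitals element_pdos (sort_orbitals element_pdos)

-- ===== LEMMAS AND PROOFS =====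

def pvCanon : List String :=
  ["s", "p", "py", "pz", "px",
   "d", "dxy", "dyz", "dz2", "dxz", "dx2",
   "f", "f_3", "f_2", "f_1", "f0", "f1", "f2", "f3"]

theorem pvRank_keys : pvRank.keys = pvCanon := by decide

theorem pvCanon_nodup : pvCanon.Nodup := by decide

theorem pvCanon_pairwise :
    pvCanon.Pairwise (fun a b => pvRank.getD a 0 < pvRank.getD b 0) := by decide

theorem pv_main (K : List String) (hK : K.Nodup) :
    pvCanon.foldl
      (fun sorted_keys key =>
        if K.contains key then sorted_keys ++ [key] else sorted_keys) []
    = PySem.List.sorted (K.filter (fun k => pvRank.contains k))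
        (fun k => pvRank.getD k 0) false := by
  rw [PySem.List.foldl_append_ite_eq_filter, List.nil_append]
  refine (PySem.List.sorted_eq_of_perm_of_pairwise_lt _ _ _ ?_ ?_).symm
  · rw [List.perm_ext_iff_of_nodup (pvCanon_nodup.filter _) (hK.filter _)]
    intro x
    simp only [List.mem_filter, List.contains_iff_mem, decide_eq_true_eq,
      PySem.Dict.contains_iff_mem_keys, pvRank_keys]
    exact ⟨fun h => ⟨h.2, h.1⟩, fun h => ⟨h.2, h.1⟩⟩
  · exact pvCanon_pairwise.sublist List.filter_sublist

-- ===== VERDICT (by name: the statement is the Claim_ definition above) =====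
theorem sort_orbitals_spec : Claim_equal_sort_orbitals := by
  intro element_pdos _
  unfold Spec_sort_orbitals sort_orbitals sort_orbitals_alt
  exact pv_main _ (PySem.Dict.nodup_keys_ofList element_pdos)
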